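-- pv_equiv track=rewrite | github.com/kacper3615/Qommunity | correctness_tests.py | get_communities_list_in_order
-- ===== SOURCE A (Python) =====
-- import itertools
--
-- def get_communities_list_in_order(
--     communities_results: list, expected_communities_order: list
-- ) -> list | None:
--     in_order = None
--     # Permutate community divisions
--     permutations = [[*c] for c in itertools.permutations(communities_results)]
--     for permutation in permutations:
--         if permutation == expected_communities_order:
--             in_order = permutation
--     return in_order
-- ===== SOURCE B (Python) =====
-- def get_communities_list_in_order(
--     communities_results: list, expected_communities_order: list
-- ) -> list | None:
--     remaining = list(communities_results)
--     for community in expected_communities_order: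
--         try:
--             remaining.remove(community)
--         except ValueError:
--             return None
--     return list(expected_communities_order) if not remaining else None
-- ===== Notes on version B (the rewrite author's own statement) =====
-- stated objective: faster
-- what changed: Replaces the enumeration of all n! permutations with a single removal loop over a shrinking 'remaining' copy that checks multiset equality directly.
import Mathlib
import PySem

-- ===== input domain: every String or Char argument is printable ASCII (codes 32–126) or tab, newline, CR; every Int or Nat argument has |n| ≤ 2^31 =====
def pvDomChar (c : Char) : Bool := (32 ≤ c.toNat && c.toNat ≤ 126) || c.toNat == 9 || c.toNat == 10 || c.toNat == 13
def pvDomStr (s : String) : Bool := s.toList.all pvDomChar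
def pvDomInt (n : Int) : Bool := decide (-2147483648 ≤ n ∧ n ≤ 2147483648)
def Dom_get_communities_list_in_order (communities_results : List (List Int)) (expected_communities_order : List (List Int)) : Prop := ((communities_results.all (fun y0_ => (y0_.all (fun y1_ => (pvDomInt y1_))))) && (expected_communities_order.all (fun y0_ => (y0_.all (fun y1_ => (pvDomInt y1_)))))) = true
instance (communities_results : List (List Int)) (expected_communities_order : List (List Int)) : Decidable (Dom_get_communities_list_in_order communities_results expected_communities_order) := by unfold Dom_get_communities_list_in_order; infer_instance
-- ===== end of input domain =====

-- B replaces the n!-permutation enumeration by a single removal loop checking multiset equality (objective: faster).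

-- ===== PORT A =====
def get_communities_list_in_order (communities_results : List (List Int)) (expected_communities_order : List (List Int)) : Option (List (List Int)) :=
  -- permutations = [[*c] for c in itertools.permutations(communities_results)]
  let permutations := (PySem.List.permutations communities_results communities_results.length).map (fun c => c)
  permutations.foldl (fun in_order permutation => if permutation = expected_communities_order then some permutation else in_order) none

-- ===== PORT B =====
-- the for-loop of Source B: remove each expected community from 'remaining'; None on ValueError
def pvAltRemoveLoop (remaining : List (List Int)) : List (List Int) → Option (List (List Int))
  | [] => some remaining
  | community :: rest =>
    match PySem.List.remove? remaining community with
    | none => none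
    | some r => pvAltRemoveLoop r rest

def get_communities_list_in_order_alt (communities_results : List (List Int)) (expected_communities_order : List (List Int)) : Option (List (List Int)) :=
  match pvAltRemoveLoop communities_results expected_communities_order with
  | none => none
  | some remaining => if remaining.isEmpty then some expected_communities_order else none

-- ===== PRECONDITION & SPEC =====
def Spec_get_communities_list_in_order (communities_results : List (List Int)) (expected_communities_order : List (List Int)) (out : Option (List (List Int))) : Prop := out = get_communities_list_in_order_alt communities_results expected_communities_order
instance (communities_results : List (List Int)) (expected_communities_order : List (List Int)) (out : Option (List (List Int))) : Decidable (Spec_get_communities_list_in_order communities_results expected_communities_order out) := by unfold Spec_get_communities_list_in_order; infer_instance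

-- ===== CLAIM (what is proved, stated in full; the proofs are below) =====
def Claim_equal_get_communities_list_in_order : Prop := ∀ (communities_results : List (List Int)) (expected_communities_order : List (List Int)), Dom_get_communities_list_in_order communities_results expected_communities_order → Spec_get_communities_list_in_order communities_results expected_communities_order (get_communities_list_in_order communities_results expected_communities_order)

-- ===== LEMMAS AND PROOFS =====

theorem pv_foldl_last_match (ec : List (List Int)) :
    ∀ (ps : List (List (List Int))) (acc : Option (List (List Int))),
      ps.foldl (fun acc p => if p = ec then some p else acc) acc
        = if ec ∈ ps then some ec else acc := by
  intro ps
  induction ps with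
  | nil => intro acc; simp
  | cons p ps ih =>
    intro acc
    simp only [List.foldl_cons, ih, List.mem_cons]
    by_cases hp : p = ec
    · subst hp
      by_cases hm : p ∈ ps <;> simp [hm]
    · have hp' : ¬ ec = p := fun h => hp h.symm
      by_cases hm : ec ∈ ps <;> simp [hp, hp', hm]

theorem pv_erase_eq_eraseIdx_idxOf (a : List Int) :
    ∀ (l : List (List Int)), a ∈ l → l.erase a = l.eraseIdx (l.idxOf a) := by
  intro l
  induction l with
  | nil => intro h; cases h
  | cons x xs ih =>
    intro h
    by_cases hx : x = a
    · subst hx; simp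
    · have hmem : a ∈ xs := by
        rcases List.mem_cons.mp h with h' | h'
        · exact absurd h'.symm hx
        · exact h'
      rw [List.erase_cons_tail (by simpa using hx), List.idxOf_cons_ne xs hx,
        Nat.succ_eq_add_one, List.eraseIdx_cons_succ, ih hmem]

theorem pv_mem_permutations_of_perm :
    ∀ (ys xs : List (List Int)), ys.Perm xs →
      ys ∈ PySem.List.permutations xs xs.length := by
  intro ys
  induction ys with
  | nil =>
    intro xs h
    have : xs = [] := h.symm.eq_nil
    subst this
    simp [PySem.List.permutations_zero]
  | cons y ys ih =>
    intro xs h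
    obtain ⟨hy, hys⟩ := List.cons_perm_iff_perm_erase.mp h
    have hlen : xs.length = ys.length + 1 := by
      have := h.length_eq; simpa using this.symm
    rw [hlen, PySem.List.permutations_succ, List.mem_flatMap]
    refine ⟨xs.idxOf y, ?_, ?_⟩
    · simp [List.mem_range, List.idxOf_lt_length_of_mem hy]
    · have hidx : xs.idxOf y < xs.length := List.idxOf_lt_length_of_mem hy
      have hget : xs[xs.idxOf y]? = some y := by
        rw [List.getElem?_eq_getElem hidx, List.getElem_idxOf hidx]
      rw [hget]
      simp only [List.mem_map]
      refine ⟨ys, ?_, rfl⟩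
      have herase : xs.eraseIdx (xs.idxOf y) = xs.erase y :=
        (pv_erase_eq_eraseIdx_idxOf y xs hy).symm
      have hlen2 : (xs.erase y).length = ys.length := by
        have := List.length_erase_of_mem hy
        omega
      rw [herase, ← hlen2]
      exact ih (xs.erase y) hys

theorem pv_removeLoop_empty_iff :
    ∀ (l rem : List (List Int)), pvAltRemoveLoop rem l = some [] ↔ rem.Perm l := by
  intro l
  induction l with
  | nil =>
    intro rem
    constructor
    · intro h
      have : rem = [] := by simpa [pvAltRemoveLoop] using h
      simp [this]
    · intro h
      have : rem = [] := h.eq_nil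
      simp [this, pvAltRemoveLoop]
  | cons x xs ih =>
    intro rem
    by_cases hx : x ∈ rem
    · rw [show pvAltRemoveLoop rem (x :: xs)
          = pvAltRemoveLoop (rem.erase x) xs by
        simp [pvAltRemoveLoop, PySem.List.remove?_eq_some_erase rem x hx]]
      rw [ih]
      constructor
      · intro h
        exact (List.cons_perm_iff_perm_erase.mpr ⟨hx, h.symm⟩).symm
      · intro h
        exact ((List.cons_perm_iff_perm_erase.mp h.symm).2).symm
    · have hn : PySem.List.remove? rem x = none :=
        (PySem.List.remove?_eq_none_iff rem x).mpr hx
      rw [show pvAltRemoveLoop rem (x :: xs) = none by simp [pvAltRemoveLoop, hn]]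
      constructor
      · intro h; cases h
      · intro h
        exact absurd ((List.cons_perm_iff_perm_erase.mp h.symm).1) hx

theorem pv_A_eq (cr ec : List (List Int)) :
    get_communities_list_in_order cr ec = if cr.Perm ec then some ec else none := by
  unfold get_communities_list_in_order
  simp only [List.map_id_fun', id]
  rw [pv_foldl_last_match]
  by_cases h : cr.Perm ec
  · rw [if_pos (pv_mem_permutations_of_perm ec cr h.symm), if_pos h]
  · rw [if_neg (fun hm => h (PySem.List.perm_of_mem_permutations hm).symm), if_neg h]

theorem pv_B_eq (cr ec : List (List Int)) :
    get_communities_list_in_order_alt cr ec = if cr.Perm ec then some ec else none := by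
  unfold get_communities_list_in_order_alt
  by_cases h : cr.Perm ec
  · rw [(pv_removeLoop_empty_iff ec cr).mpr h]
    simp [h]
  · rw [if_neg h]
    rcases hv : pvAltRemoveLoop cr ec with _ | rem
    · rfl
    · have : rem ≠ [] := by
        intro he; subst he
        exact h ((pv_removeLoop_empty_iff ec cr).mp hv)
      simp [List.isEmpty_iff, this]

-- ===== VERDICT (by name: the statement is the Claim_ definition above) =====
theorem get_communities_list_in_order_spec : Claim_equal_get_communities_list_in_order := by
  intro cr ec _
  unfold Spec_get_communities_list_in_order
  rw [pv_A_eq, pv_B_eq]
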